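-- pv_equiv track=rewrite | github.com/syedaliabbas1/Tableau | test7.py | get_constants
-- ===== SOURCE A (Python) =====
-- MAX_CONSTANTS = 10
--
-- def get_constants(branch):
--     constants = set()
--     next_const = 0
--     for formula in branch:
--         for i in range(MAX_CONSTANTS):
--             const = f'c{i}'
--             if const in formula:
--                 constants.add(const)
--                 next_const = max(next_const, i + 1)
--     return constants, next_const
-- ===== SOURCE B (Python) =====
-- def get_constants(branch):
--     constants = set()
--     next_const = 0
--     for formula in branch:
--         found = sorted({formula[j + 1] for j in range(len(formula) - 1)
--                         if formula[j] == 'c' and '0' <= formula[j + 1] <= '9'})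
--         for d in found:
--             constants.add('c' + d)
--             next_const = max(next_const, ord(d) - ord('0') + 1)
--     return constants, next_const
-- ===== Notes on version B (the rewrite author's own statement) =====
-- stated objective: alternative
-- what changed: Instead of probing each formula with all 10 candidate substrings 'c0'..'c9', B makes a single character scan per formula collecting the digits that follow a 'c', and derives both the constant-name set and next_const from that digit set.
import Mathlib
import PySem

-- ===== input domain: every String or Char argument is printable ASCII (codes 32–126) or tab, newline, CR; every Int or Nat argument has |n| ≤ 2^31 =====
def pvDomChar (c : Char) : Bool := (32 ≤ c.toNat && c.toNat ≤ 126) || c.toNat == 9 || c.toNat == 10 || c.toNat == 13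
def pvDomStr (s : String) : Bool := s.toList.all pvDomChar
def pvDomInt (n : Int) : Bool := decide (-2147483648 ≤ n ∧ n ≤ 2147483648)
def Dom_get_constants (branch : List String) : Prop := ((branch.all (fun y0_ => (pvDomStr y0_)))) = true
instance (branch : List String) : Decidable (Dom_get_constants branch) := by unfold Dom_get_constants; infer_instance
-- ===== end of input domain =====

-- B replaces A's 10 substring probes per formula by a single character scan for 'c'+digit
-- pairs, deriving both the constant names and next_const from the scanned digits (alternative).


-- ===== PORT A =====
def get_constants (branch : List String) : List String × Int :=
  branch.foldl (fun st formula =>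
    (PySem.List.pyRange 0 10 1).foldl (fun st i =>
      let const : String := String.mk ('c' :: PySem.Int.toChars i)   -- f'c{i}'
      if PySem.Str.isIn const formula then
        (PySem.Set.add st.1 const, max st.2 (i + 1))
      else st) st)
    (PySem.Set.empty, 0)

-- ===== PORT B =====
-- the comprehension body of {formula[j+1] for j in range(len(formula)-1) if formula[j] == 'c'
-- and '0' <= formula[j+1] <= '9'}: the qualifying second characters in scan order
-- (deduplicated by PySem.Set.ofList at the use site)
def pvScanDigits : List Char → List Char
  | a :: b :: rest =>
      if a = 'c' ∧ '0' ≤ b ∧ b ≤ '9' then b :: pvScanDigits (b :: rest)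
      else pvScanDigits (b :: rest)
  | _ => []

def get_constants_alt (branch : List String) : List String × Int :=
  branch.foldl (fun st formula =>
    let found := PySem.List.sorted (PySem.Set.ofList (pvScanDigits formula.toList)) (fun d => d) false
    found.foldl (fun st d =>
      (PySem.Set.add st.1 (String.mk ['c', d]),            -- 'c' + d
       max st.2 ((d.toNat : Int) - ('0'.toNat : Int) + 1)))  -- ord(d) - ord('0') + 1
      st)
    (PySem.Set.empty, 0)

-- ===== PRECONDITION & SPEC =====
def Spec_get_constants (branch : List String) (out : List String × Int) : Prop := out = get_constants_alt branch
instance (branch : List String) (out : List String × Int) : Decidable (Spec_get_constants branch out) := by unfold Spec_get_constants; infer_instance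

-- ===== CLAIM (what is proved, stated in full; the proofs are below) =====
def Claim_equal_get_constants : Prop := ∀ (branch : List String), Dom_get_constants branch → Spec_get_constants branch (get_constants branch)

-- ===== LEMMAS AND PROOFS =====

-- every character the scan collects is a decimal digit
theorem pvScanDigits_digit (l : List Char) : ∀ d ∈ pvScanDigits l, '0' ≤ d ∧ d ≤ '9' := by
  induction l with
  | nil => simp [pvScanDigits]
  | cons a tl ih =>
      cases tl with
      | nil => simp [pvScanDigits]
      | cons b rest =>
          simp only [pvScanDigits]
          split_ifs with h
          · intro d hd
            rcases List.mem_cons.1 hd with rfl | hd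
            · exact ⟨h.2.1, h.2.2⟩
            · exact ih d hd
          · exact ih

-- a digit is scanned exactly when 'c' followed by it occurs as a substring
theorem mem_pvScanDigits_iff (d : Char) (hd : '0' ≤ d ∧ d ≤ '9') (l : List Char) :
    d ∈ pvScanDigits l ↔ ['c', d] <:+: l := by
  induction l with
  | nil => simp [pvScanDigits]
  | cons a tl ih =>
      cases tl with
      | nil =>
          simp only [pvScanDigits]
          constructor
          · intro h; simp at h
          · intro h; have := h.length_le; simp at this
      | cons b rest =>
          rw [List.infix_cons_iff]
          simp only [pvScanDigits]
          have hpre : (['c', d] <+: a :: b :: rest) ↔ (a = 'c' ∧ b = d) := by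
            constructor
            · intro h
              rw [List.cons_prefix_cons] at h
              obtain ⟨h1, h2⟩ := h
              rw [List.cons_prefix_cons] at h2
              exact ⟨h1.symm, h2.1.symm⟩
            · rintro ⟨rfl, rfl⟩
              exact ⟨rest, rfl⟩
          rw [hpre]
          split_ifs with h
          · simp only [List.mem_cons, ih]
            constructor
            · rintro (rfl | h2)
              · exact Or.inl ⟨h.1, rfl⟩
              · exact Or.inr h2
            · rintro (⟨_, rfl⟩ | h2)
              · exact Or.inl rfl
              · exact Or.inr h2
          · rw [ih]
            constructor
            · exact Or.inr
            · rintro (⟨rfl, rfl⟩ | h2)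
              · exact absurd ⟨rfl, hd⟩ h
              · exact h2

-- the ten digit characters in ascending order
def pvD10 : List Char := ['0','1','2','3','4','5','6','7','8','9']

theorem pv_digit_mem_D10 (d : Char) (hd : '0' ≤ d ∧ d ≤ '9') : d ∈ pvD10 := by
  obtain ⟨h1, h2⟩ := hd
  rw [Char.le_def, UInt32.le_iff_toNat_le] at h1 h2
  have hof : Char.ofNat d.toNat = d := Char.ofNat_toNat d
  rw [← hof]
  have h1' : 48 ≤ d.toNat := h1
  have h2' : d.toNat ≤ 57 := h2
  interval_cases (d.toNat) <;> decide

-- B's per-formula sorted digit set is exactly A's per-formula probe order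
theorem pv_found_eq (f : String) :
    PySem.List.sorted (PySem.Set.ofList (pvScanDigits f.toList)) (fun d => d) false
      = pvD10.filter (fun d => PySem.Str.isIn (String.mk ['c', d]) f) := by
  apply PySem.List.sorted_eq_of_perm_of_pairwise_lt
  · rw [List.perm_ext_iff_of_nodup (List.Nodup.filter _ (by decide)) (PySem.Set.nodup_ofList _)]
    intro d
    rw [List.mem_filter, PySem.Set.mem_ofList]
    constructor
    · rintro ⟨hm, hin⟩
      have hd : '0' ≤ d ∧ d ≤ '9' := by fin_cases hm <;> decide
      rw [mem_pvScanDigits_iff d hd]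
      have hmk : (String.mk ['c', d]).toList = ['c', d] := Eq.symm ((fun {l} {s} => String.ofList_eq.mp) rfl)
      have := (PySem.Str.isIn_iff_infix _ _).mp hin
      rwa [hmk] at this
    · intro h
      have hd := pvScanDigits_digit _ _ h
      refine ⟨pv_digit_mem_D10 d hd, ?_⟩
      rw [PySem.Str.isIn_iff_infix]
      have hmk : (String.mk ['c', d]).toList = ['c', d] := Eq.symm ((fun {l} {s} => String.ofList_eq.mp) rfl)
      rw [hmk]
      exact (mem_pvScanDigits_iff d hd _).mp h
  · exact List.Pairwise.filter _ (by decide)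

-- the two per-formula loop bodies agree on every state
theorem pv_step_eq (st : List String × Int) (f : String) :
    (PySem.List.pyRange 0 10 1).foldl (fun st i =>
      let const : String := String.mk ('c' :: PySem.Int.toChars i)
      if PySem.Str.isIn const f then
        (PySem.Set.add st.1 const, max st.2 (i + 1))
      else st) st
    = (PySem.List.sorted (PySem.Set.ofList (pvScanDigits f.toList)) (fun d => d) false).foldl
        (fun st d =>
          (PySem.Set.add st.1 (String.mk ['c', d]),
           max st.2 ((d.toNat : Int) - ('0'.toNat : Int) + 1))) st := by
  rw [pv_found_eq, List.foldl_filter]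
  have hmap : PySem.List.pyRange 0 10 1 = pvD10.map (fun d => (d.toNat : Int) - 48) := by decide
  rw [hmap, List.foldl_map]
  apply PySem.List.foldl_congr_mem
  intro acc d hd
  fin_cases hd <;> rfl

-- ===== VERDICT (by name: the statement is the Claim_ definition above) =====
theorem get_constants_spec : Claim_equal_get_constants := by
  intro branch _
  unfold Spec_get_constants get_constants get_constants_alt
  simp only [pv_step_eq]
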